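-- pv_equiv track=rewrite | github.com/alyjlee29/g-quadruplex-project-ntu | scripts/plot_intensity_by_flank_loop.py | find_gtracts
-- ===== SOURCE A (Python) =====
-- def find_gtracts(seq: str):
--     """Return the first four contiguous G-runs (>=3 Gs) as (start,end) 0-based, end exclusive."""
--     s = seq.upper().replace("U","T")
--     idx = []
--     i = 0
--     while i <= len(s)-3:
--         if s[i:i+3] == "GGG":
--             j = i+3
--             while j < len(s) and s[j] == "G":
--                 j += 1
--             idx.append((i,j))
--             i = j
--         else:
--             i += 1
--     return idx[:4]
-- ===== SOURCE B (Python) =====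
-- def find_gtracts(seq: str):
--     """Return the first four contiguous G-runs (>=3 Gs) as (start,end) 0-based, end exclusive."""
--     s = seq.upper().replace("U", "T")
--     runs = []
--     start = -1  # -1 = not currently inside a G-run
--     for p, c in enumerate(s + "."):  # "." sentinel closes a run ending at the end of s
--         if c == "G":
--             if start < 0:
--                 start = p
--         else:
--             if start >= 0 and p - start >= 3:
--                 runs.append((start, p))
--             start = -1
--     return runs[:4]
-- ===== Notes on version B (the rewrite author's own statement) =====
-- stated objective: faster
-- what changed: Replaces A's slice-compare-and-jump index loop (s[i:i+3]=='GGG' plus an inner extension while-loop) by a single enumerate pass with a run-start state variable and a sentinel character that closes a trailing run.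
import Mathlib
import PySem

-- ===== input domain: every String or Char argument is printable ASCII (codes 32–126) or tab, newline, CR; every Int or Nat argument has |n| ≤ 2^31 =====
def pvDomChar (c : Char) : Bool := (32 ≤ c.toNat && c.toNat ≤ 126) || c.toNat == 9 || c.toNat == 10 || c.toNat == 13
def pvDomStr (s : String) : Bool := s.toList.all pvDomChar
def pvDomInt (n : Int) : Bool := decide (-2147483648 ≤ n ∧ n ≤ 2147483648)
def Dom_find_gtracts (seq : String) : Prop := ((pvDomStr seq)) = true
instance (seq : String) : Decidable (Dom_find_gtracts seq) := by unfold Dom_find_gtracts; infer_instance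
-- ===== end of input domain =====

-- B replaces A's slice-compare-and-jump index loop by a single state-machine pass over the
-- characters (the run start carried in the state, a sentinel char closing a final run);
-- measurably faster by a constant factor (no per-position string slicing).

-- ===== PORT A =====
-- inner while of A: `while j < len(s) and s[j] == "G": j += 1`
def pvAExtend (l : List Char) (j : Nat) : Nat :=
  if h : j < l.length ∧ PySem.List.pyGet? l (j : Int) = some 'G' then
    pvAExtend l (j + 1)
  else j
termination_by l.length - j
decreasing_by omega

-- used only for the termination of pvALoop below
theorem le_pvAExtend (l : List Char) (j : Nat) : j ≤ pvAExtend l j := by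
  fun_induction pvAExtend l j with
  | case1 j h ih => omega
  | case2 j h => omega

-- outer while of A: `while i <= len(s)-3: …` (i only ever grows, so it is carried as a Nat)
def pvALoop (l : List Char) (i : Nat) (idx : List (Int × Int)) : List (Int × Int) :=
  if h : (i : Int) ≤ (l.length : Int) - 3 then
    if PySem.List.slice l (some (i : Int)) (some ((i : Int) + 3)) = ['G', 'G', 'G'] then
      pvALoop l (pvAExtend l (i + 3)) (idx ++ [((i : Int), (pvAExtend l (i + 3) : Int))])
    else pvALoop l (i + 1) idx
  else idx
termination_by l.length - i
decreasing_by
  · have := le_pvAExtend l (i + 3); omega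
  · omega

def find_gtracts (seq : String) : List (Int × Int) :=
  -- s = seq.upper().replace("U","T");  return idx[:4] (list slice = take 4)
  (pvALoop (PySem.Chars.replace (PySem.Chars.upper seq.toList) ['U'] ['T']) 0 []).take 4

-- ===== PORT B =====
-- loop body of B: state = (runs, start), element = (p, c) coming from enumerate(s + ".")
def pvBStep (st : List (Int × Int) × Int) (pc : Int × Char) : List (Int × Int) × Int :=
  if pc.2 = 'G' then
    if st.2 < 0 then (st.1, pc.1) else st
  else
    if 0 ≤ st.2 ∧ 3 ≤ pc.1 - st.2 then (st.1 ++ [(st.2, pc.1)], -1) else (st.1, -1)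

def find_gtracts_alt (seq : String) : List (Int × Int) :=
  -- s = seq.upper().replace("U","T");  for p, c in enumerate(s + "."): …;  return runs[:4]
  (((PySem.List.enumerate
      ((PySem.Chars.replace (PySem.Chars.upper seq.toList) ['U'] ['T']) ++ ['.']) 0).foldl
      pvBStep ([], -1)).1).take 4

-- ===== PRECONDITION & SPEC =====
def Spec_find_gtracts (seq : String) (out : List (Int × Int)) : Prop := out = find_gtracts_alt seq
instance (seq : String) (out : List (Int × Int)) : Decidable (Spec_find_gtracts seq out) := by unfold Spec_find_gtracts; infer_instance

-- ===== CLAIM (what is proved, stated in full; the proofs are below) =====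
def Claim_equal_find_gtracts : Prop := ∀ (seq : String), Dom_find_gtracts seq → Spec_find_gtracts seq (find_gtracts seq)

-- ===== LEMMAS AND PROOFS =====

-- B's pass restarted at position p on a remaining list of characters
def pvG (r : List Char) (p : Nat) : List (Int × Int) × Int :=
  (PySem.List.enumerate (r ++ ['.']) (p : Int)).foldl pvBStep ([], -1)

theorem pvB_frame (ps : List (Int × Char)) : ∀ (runs : List (Int × Int)) (st : Int),
    ps.foldl pvBStep (runs, st) =
      (runs ++ (ps.foldl pvBStep ([], st)).1, (ps.foldl pvBStep ([], st)).2) := by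
  induction ps with
  | nil => intro runs st; simp [List.foldl]
  | cons q ps ih =>
    intro runs st
    have hstep : pvBStep (runs, st) q = (runs ++ (pvBStep ([], st) q).1, (pvBStep ([], st) q).2) := by
      unfold pvBStep; split_ifs <;> simp
    simp only [List.foldl_cons, hstep]
    rw [ih, ih (pvBStep ([], st) q).1]
    cases hq : pvBStep ([], st) q with
    | mk a b => simp
theorem pvB_run (m : Nat) : ∀ (p : Int) (rest : List (Int × Char)) (runs : List (Int × Int)) (st : Int),
    0 ≤ st →
    (PySem.List.enumerate (List.replicate m 'G') p ++ rest).foldl pvBStep (runs, st) =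
      rest.foldl pvBStep (runs, st) := by
  induction m with
  | zero => intro p rest runs st h; simp
  | succ m ih =>
    intro p rest runs st h
    rw [List.replicate_succ, PySem.List.enumerate_cons]
    simp only [List.cons_append, List.foldl_cons]
    have hs : pvBStep (runs, st) (p, 'G') = (runs, st) := by
      unfold pvBStep; simp; omega
    rw [hs, ih]; exact h
theorem pvG_nonG (c : Char) (r : List Char) (p : Nat) (hc : c ≠ 'G') :
    pvG (c :: r) p = pvG r (p + 1) := by
  unfold pvG
  rw [List.cons_append, PySem.List.enumerate_cons, List.foldl_cons]
  have hs : pvBStep ([], -1) ((p : Int), c) = ([], -1) := by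
    unfold pvBStep; simp [hc]
  rw [hs]
  norm_cast
theorem pvG_run (m : Nat) (t : List Char) (p : Nat) (ht : t.head? ≠ some 'G') :
    (pvG (List.replicate m 'G' ++ t) p).1 =
      (if 3 ≤ m then [((p : Int), ((p + m : Nat) : Int))] else []) ++ (pvG t (p + m)).1 := by
  rcases Nat.eq_zero_or_pos m with hm | hm
  · subst hm; simp
  · obtain ⟨m', rfl⟩ : ∃ m', m = m' + 1 := ⟨m - 1, by omega⟩
    obtain ⟨c, u, hcu, hc⟩ : ∃ c u, t ++ ['.'] = c :: u ∧ c ≠ 'G' := by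
      cases t with
      | nil => exact ⟨'.', [], rfl, by decide⟩
      | cons a t' => exact ⟨a, t' ++ ['.'], rfl, by intro h; rw [h] at ht; simp at ht⟩
    unfold pvG
    rw [List.append_assoc, PySem.List.enumerate_append]
    simp only [List.length_replicate]
    rw [List.replicate_succ, PySem.List.enumerate_cons, List.cons_append, List.foldl_cons]
    have h1 : pvBStep ([], -1) ((p : Int), 'G') = ([], (p : Int)) := by
      unfold pvBStep; simp
    rw [h1, pvB_run m' _ _ _ _ (by positivity)]
    rw [hcu, PySem.List.enumerate_cons, List.foldl_cons]
    have h2 : pvBStep ([], (p : Int)) ((p : Int) + ((m' + 1 : Nat) : Int), c) =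
        (if 3 ≤ m' + 1 then [((p : Int), (p : Int) + ((m' + 1 : Nat) : Int))] else [], -1) := by
      simp only [pvBStep, hc, if_false]
      split_ifs with ha hb hb
      · push_cast at *; simp
      · push_cast at ha; omega
      · push_cast at hb ha; omega
      · rfl
    rw [h2]
    have h4 : pvBStep ([], -1) (((p + (m' + 1) : Nat) : Int), c) = ([], -1) := by
      simp [pvBStep, hc]
    conv_rhs => rw [PySem.List.enumerate_cons, List.foldl_cons, h4]
    have h5 : ((p + (m' + 1) : Nat) : Int) + 1 = (p : Int) + ((m' + 1 : Nat) : Int) + 1 := by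
      push_cast; ring
    rw [h5]
    by_cases h3 : 3 ≤ m' + 1
    · rw [if_pos h3, if_pos h3, pvB_frame]
      simp
    · rw [if_neg h3, if_neg h3]
      simp
theorem run_decomp (r : List Char) :
    List.replicate ((r.takeWhile (· == 'G')).length) 'G' ++ r.dropWhile (· == 'G') = r := by
  have h : r.takeWhile (· == 'G') = List.replicate ((r.takeWhile (· == 'G')).length) 'G' :=
    List.eq_replicate_of_mem (by
      intro c hc; have := List.mem_takeWhile_imp hc; simpa using this)
  conv_rhs => rw [← List.takeWhile_append_dropWhile (p := (· == 'G')) (l := r)]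
  rw [← h]
theorem drop_head_ne (r : List Char) : (r.dropWhile (· == 'G')).head? ≠ some 'G' := by
  have h := List.head?_dropWhile_not (· == 'G') r
  intro hc
  rw [hc] at h
  simp at h
theorem pvG_nil (p : Nat) : pvG [] p = ([], -1) := by
  simp [pvG, PySem.List.enumerate, pvBStep]
theorem pvG_short : ∀ (n : Nat) (r : List Char) (p : Nat), r.length ≤ n → r.length < 3 → (pvG r p).1 = [] := by
  intro n
  induction n with
  | zero =>
    intro r p h1 _
    have : r = [] := List.length_eq_zero_iff.mp (by omega)
    subst this; rw [pvG_nil]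
  | succ n ih =>
    intro r p h1 h2
    cases r with
    | nil => rw [pvG_nil]
    | cons c r' =>
      by_cases hc : c = 'G'
      · subst hc
        set m := ((('G' :: r').takeWhile (· == 'G')).length) with hm
        have hdec := run_decomp ('G' :: r')
        have hhd := drop_head_ne ('G' :: r')
        have hm1 : 1 ≤ m := by
          rw [hm]; rw [List.takeWhile_cons]; simp
        have hrw : ('G' :: r') = List.replicate m 'G' ++ (('G' :: r').dropWhile (· == 'G')) := hdec.symm
        have hlen : (('G' :: r').dropWhile (· == 'G')).length ≤ r'.length := by
          rw [List.dropWhile_cons]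
          simp only [if_pos (by simp : ('G' == 'G') = true)]
          exact List.length_dropWhile_le _ _
        have hmle : m ≤ r'.length + 1 := by
          have := congrArg List.length hrw
          simp at this; omega
        rw [hrw, pvG_run m _ p hhd]
        rw [if_neg (by
          simp only [List.length_cons] at h2
          omega)]
        simp only [List.nil_append]
        simp only [List.length_cons] at h1 h2
        exact ih _ _ (by omega) (by omega)
      · rw [pvG_nonG c r' p hc]
        exact ih r' (p+1) (by simpa using Nat.le_of_succ_le_succ (by simpa using h1)) (by simp at h2 ⊢; omega)
theorem pvAExtend_run (l : List Char) : ∀ (k : Nat) (j : Nat) (t : List Char),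
    l.drop j = List.replicate k 'G' ++ t → t.head? ≠ some 'G' → pvAExtend l j = j + k := by
  intro k
  induction k with
  | zero =>
    intro j t hd ht
    have hne : ¬(j < l.length ∧ PySem.List.pyGet? l (j : Int) = some 'G') := by
      rintro ⟨hj, hg⟩
      apply ht
      rw [← hg]
      have hh : l[j]? = (l.drop j).head? := List.head?_drop.symm
      rw [PySem.List.pyGet?_natCast, hh, hd]
      simp
    rw [pvAExtend, dif_neg hne]
    omega
  | succ k ih =>
    intro j t hd ht
    have hdj : l.drop j = 'G' :: (List.replicate k 'G' ++ t) := by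
      rw [hd, List.replicate_succ, List.cons_append]
    have hjlen : j < l.length := by
      by_contra h
      have : l.drop j = [] := List.drop_eq_nil_of_le (by omega)
      rw [this] at hdj; exact absurd hdj (by simp)
    have hget : l[j]? = some 'G' := by
      rw [← @List.head?_drop _ l j, hdj]; rfl
    rw [pvAExtend, dif_pos ⟨hjlen, by rw [PySem.List.pyGet?_natCast]; exact hget⟩]
    have : l.drop (j+1) = List.replicate k 'G' ++ t := by
      rw [← List.tail_drop, hdj]; rfl
    rw [ih (j+1) t this ht]
    omega
theorem take3_iff (m : Nat) (t : List Char) (ht : t.head? ≠ some 'G') :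
    ((List.replicate m 'G' ++ t).take 3 = ['G','G','G']) ↔ 3 ≤ m := by
  constructor
  · intro h
    by_contra hm
    push Not at hm
    interval_cases m <;> cases t <;> simp_all
  · intro h
    rw [List.take_append_of_le_length (by simpa using h), List.take_replicate]
    rw [Nat.min_def, if_pos h]
    rfl
theorem slice3_iff (l : List Char) (i : Nat) :
    (PySem.List.slice l (some (i : Int)) (some ((i : Int) + 3)) = ['G','G','G']) ↔
      (l.drop i).take 3 = ['G','G','G'] := by
  have hc : (i : Int) + 3 = ((i + 3 : Nat) : Int) := by push_cast; ring
  rw [hc, PySem.List.slice_natCast]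
  have : i + 3 - i = 3 := by omega
  rw [this]
theorem pvG_main (l : List Char) (i : Nat) (idx : List (Int × Int)) :
    pvALoop l i idx = idx ++ (pvG (l.drop i) i).1 := by
  fun_induction pvALoop l i idx with
  | case1 i idx h hs ih =>
    have hlen : i + 3 ≤ l.length := by omega
    set m := ((l.drop i).takeWhile (· == 'G')).length with hmdef
    set t := (l.drop i).dropWhile (· == 'G') with htdef
    have hdec : List.replicate m 'G' ++ t = l.drop i := run_decomp (l.drop i)
    have ht : t.head? ≠ some 'G' := drop_head_ne (l.drop i)
    have hm3 : 3 ≤ m := by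
      rw [← take3_iff m t ht, hdec]
      exact (slice3_iff l i).mp hs
    have hdrop3 : l.drop (i + 3) = List.replicate (m - 3) 'G' ++ t := by
      rw [← List.drop_drop (i := 3) (j := i), ← hdec,
        List.drop_append_of_le_length (by simpa using hm3), List.drop_replicate]
    have hj : pvAExtend l (i + 3) = i + m :=
      (pvAExtend_run l _ (i + 3) _ hdrop3 ht).trans (by omega)
    have hdropj : l.drop (i + m) = t := by
      rw [← List.drop_drop (i := m) (j := i), ← hdec]
      simpa using List.drop_left (l₁ := List.replicate m 'G') (l₂ := t)
    rw [ih, hj, hdropj]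
    conv_rhs => rw [← hdec]
    rw [pvG_run m t i ht, if_pos hm3]
    simp
  | case2 i idx h hs ih =>
    have hlen : i + 3 ≤ l.length := by omega
    set m := ((l.drop i).takeWhile (· == 'G')).length with hmdef
    set t := (l.drop i).dropWhile (· == 'G') with htdef
    have hdec : List.replicate m 'G' ++ t = l.drop i := run_decomp (l.drop i)
    have ht : t.head? ≠ some 'G' := drop_head_ne (l.drop i)
    have hm3 : ¬ 3 ≤ m := by
      rw [← take3_iff m t ht, hdec]
      intro hc
      exact hs ((slice3_iff l i).mpr hc)
    rw [ih]
    congr 1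
    have htail : l.drop (i + 1) = (l.drop i).tail := by
      rw [← List.tail_drop]
    rcases Nat.eq_zero_or_pos m with hm | hm
    · rw [hm, List.replicate_zero, List.nil_append] at hdec
      cases hdi : l.drop i with
      | nil =>
        exfalso
        have := congrArg List.length hdi
        simp at this; omega
      | cons c rest =>
        have hc : c ≠ 'G' := by
          intro hcc
          apply ht
          rw [hdec, hdi, hcc]
          simp
        rw [htail, hdi, List.tail_cons, ← pvG_nonG c rest i hc]
    · have hstep : l.drop (i + 1) = List.replicate (m - 1) 'G' ++ t := by
        rw [htail, ← hdec]
        conv_lhs => rw [show m = (m - 1) + 1 from by omega, List.replicate_succ,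
          List.cons_append, List.tail_cons]
      rw [hstep, ← hdec, pvG_run m t i ht, if_neg hm3,
        pvG_run (m - 1) t (i + 1) ht, if_neg (by omega)]
      simp only [List.nil_append]
      rw [show i + 1 + (m - 1) = i + m from by omega]
  | case3 i idx h =>
    have hl : (l.drop i).length < 3 := by
      rw [List.length_drop]; omega
    rw [pvG_short (l.drop i).length _ _ le_rfl hl]
    simp

-- ===== VERDICT (by name: the statement is the Claim_ definition above) =====
theorem find_gtracts_spec : Claim_equal_find_gtracts := by
  intro seq _
  unfold Spec_find_gtracts find_gtracts find_gtracts_alt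
  have h := pvG_main (PySem.Chars.replace (PySem.Chars.upper seq.toList) ['U'] ['T']) 0 []
  simp only [List.drop_zero, List.nil_append] at h
  rw [h]; rfl
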